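-- pv_equiv track=rewrite | github.com/osdeving/calculo-em-movimento | scripts/build_curso_bundle.py | protect_display_math
-- ===== SOURCE A (Python) =====
-- def protect_display_math(markdown_text: str) -> str:
--     lines = markdown_text.splitlines()
--     protected: list[str] = []
--     index = 0
--
--     while index < len(lines):
--         if lines[index].strip() == "$$":
--             block: list[str] = []
--             index += 1
--             while index < len(lines) and lines[index].strip() != "$$":
--                 block.append(lines[index])
--                 index += 1
--
--             protected.append("")
--             protected.append('<div class="math-block">')
--             protected.append("$$")
--             protected.extend(block)
--             protected.append("$$")
--             protected.append("</div>")
--             protected.append("")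
--
--             if index < len(lines) and lines[index].strip() == "$$":
--                 index += 1
--             continue
--
--         protected.append(lines[index])
--         index += 1
--
--     return "\n".join(protected) + ("\n" if markdown_text.endswith("\n") else "")
-- ===== SOURCE B (Python) =====
-- def protect_display_math(markdown_text: str) -> str:
--     out: list[str] = []
--     in_math = False
--     for line in markdown_text.splitlines():
--         if line.strip() == "$$":
--             if in_math:
--                 out += ["$$", "</div>", ""]
--             else:
--                 out += ["", '<div class="math-block">', "$$"]
--             in_math = not in_math
--         else:
--             out.append(line)
--     if in_math:
--         out += ["$$", "</div>", ""]
--     return "\n".join(out) + ("\n" if markdown_text.endswith("\n") else "")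
-- ===== Notes on version B (the rewrite author's own statement) =====
-- stated objective: idiomatic
-- what changed: Replaced A's index-driven outer while with a nested inner while that scans ahead for the closing $$ (and explicit index skipping) by a single flat for-loop over the lines maintaining an in_math boolean flag that toggles on each $$ delimiter, with one auto-close after the loop.
import Mathlib
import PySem

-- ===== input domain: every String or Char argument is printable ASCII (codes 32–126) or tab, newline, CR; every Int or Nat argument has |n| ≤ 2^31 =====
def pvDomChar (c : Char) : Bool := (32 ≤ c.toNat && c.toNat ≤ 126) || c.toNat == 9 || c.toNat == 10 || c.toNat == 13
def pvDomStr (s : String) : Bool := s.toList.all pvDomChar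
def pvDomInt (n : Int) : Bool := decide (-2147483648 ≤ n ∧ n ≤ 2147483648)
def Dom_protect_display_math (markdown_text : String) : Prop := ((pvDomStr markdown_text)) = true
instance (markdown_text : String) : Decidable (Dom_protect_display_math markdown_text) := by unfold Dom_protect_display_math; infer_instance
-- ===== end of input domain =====

-- B replaces A's nested index/inner-while scan by a single flat pass with an in_math flag (idiomatic decomposition; same O(n) cost).


-- ===== PORT A =====
-- inner while: collect lines until one strips to "$$" (or the end); returns (block, remaining-from-the-closer)
def pvInnerA : List String → List String × List String
  | [] => ([], [])
  | l :: rest =>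
    if PySem.Str.strip l = "$$" then ([], l :: rest)
    else
      let p := pvInnerA rest
      (l :: p.1, p.2)

theorem pvInnerA_len (xs : List String) : (pvInnerA xs).2.length ≤ xs.length := by
  induction xs with
  | nil => simp [pvInnerA]
  | cons l rest ih =>
    simp only [pvInnerA]
    split
    · simp
    · simpa using Nat.le_succ_of_le ih

-- "if index < len(lines) and lines[index].strip() == '$$': index += 1"
def pvSkipA : List String → List String
  | [] => []
  | c :: t => if PySem.Str.strip c = "$$" then t else c :: t

theorem pvSkipA_len (xs : List String) : (pvSkipA xs).length ≤ xs.length := by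
  cases xs with
  | nil => simp [pvSkipA]
  | cons c t => simp only [pvSkipA]; split <;> simp

-- outer while over the remaining lines
def pvLoopA : List String → List String
  | [] => []
  | l :: rest =>
    if PySem.Str.strip l = "$$" then
      let p := pvInnerA rest
      "" :: "<div class=\"math-block\">" :: "$$" :: (p.1 ++ "$$" :: "</div>" :: "" :: pvLoopA (pvSkipA p.2))
    else l :: pvLoopA rest
termination_by xs => xs.length
decreasing_by
  · exact Nat.lt_succ_of_le (le_trans (pvSkipA_len _) (pvInnerA_len rest))
  · simp

def protect_display_math (markdown_text : String) : String :=
  PySem.Str.join "\n" (pvLoopA (PySem.Str.splitlines markdown_text))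
    ++ (if PySem.Str.endswith markdown_text "\n" then "\n" else "")

-- ===== PORT B =====
-- single pass with an in_math flag; auto-closes an unterminated block at the end
def pvLoopB : List String → Bool → List String
  | [], inm => if inm then ["$$", "</div>", ""] else []
  | l :: rest, inm =>
    if PySem.Str.strip l = "$$" then
      if inm then "$$" :: "</div>" :: "" :: pvLoopB rest false
      else "" :: "<div class=\"math-block\">" :: "$$" :: pvLoopB rest true
    else l :: pvLoopB rest inm

def protect_display_math_alt (markdown_text : String) : String :=
  PySem.Str.join "\n" (pvLoopB (PySem.Str.splitlines markdown_text) false)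
    ++ (if PySem.Str.endswith markdown_text "\n" then "\n" else "")

-- ===== PRECONDITION & SPEC =====
def Spec_protect_display_math (markdown_text : String) (out : String) : Prop := out = protect_display_math_alt markdown_text
instance (markdown_text : String) (out : String) : Decidable (Spec_protect_display_math markdown_text out) := by unfold Spec_protect_display_math; infer_instance

-- ===== CLAIM (what is proved, stated in full; the proofs are below) =====
def Claim_equal_protect_display_math : Prop := ∀ (markdown_text : String), Dom_protect_display_math markdown_text → Spec_protect_display_math markdown_text (protect_display_math markdown_text)

-- ===== LEMMAS AND PROOFS =====
theorem pvLoop_eq (xs : List String) :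
    pvLoopA xs = pvLoopB xs false ∧
    (pvInnerA xs).1 ++ "$$" :: "</div>" :: "" :: pvLoopA (pvSkipA (pvInnerA xs).2) = pvLoopB xs true := by
  induction xs with
  | nil => simp [pvLoopA, pvLoopB, pvInnerA, pvSkipA]
  | cons l rest ih =>
    by_cases h : PySem.Str.strip l = "$$"
    · constructor
      · rw [pvLoopA]
        simp only [if_pos h, pvLoopB, ih.2]
        simp
      · simp only [pvInnerA, if_pos h, pvSkipA, pvLoopB, List.nil_append, ih.1]
        simp
    · constructor
      · rw [pvLoopA]
        simp only [if_neg h, pvLoopB, ih.1]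
      · simp only [pvInnerA, if_neg h, pvLoopB, List.cons_append, ih.2]

-- ===== VERDICT (by name: the statement is the Claim_ definition above) =====
theorem protect_display_math_spec : Claim_equal_protect_display_math := by
  intro s _
  unfold Spec_protect_display_math protect_display_math protect_display_math_alt
  rw [(pvLoop_eq _).1]
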